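-- pv_equiv track=rewrite | github.com/james5635/GeekForGeek-Data-Structure-and-Algorithm | sorting/easy/sort_wave_form/solution.py | is_wave_form
-- ===== SOURCE A (Python) =====
-- def is_wave_form(arr):
--     """
--     Check if array is in wave form.
--
--     Args:
--         arr: List of integers
--
--     Returns:
--         bool: True if array is in wave form
--     """
--     n = len(arr)
--     for i in range(1, n, 2):
--         if i > 0 and arr[i] > arr[i - 1]:
--             return False
--         if i < n - 1 and arr[i] > arr[i + 1]:
--             return False
--     return True
-- ===== SOURCE B (Python) =====
-- def is_wave_form(arr):
--     """Edge-centric check: each adjacent pair must fall on even edges and rise on odd edges."""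
--     return all((a >= b) if i % 2 == 0 else (a <= b)
--                for i, (a, b) in enumerate(zip(arr, arr[1:])))
-- ===== Notes on version B (the rewrite author's own statement) =====
-- stated objective: idiomatic
-- what changed: Replaced the vertex-centric step-2 loop over odd indices (checking both incident edges with boundary guards and early returns) by a single unit-step all() over adjacent pairs from enumerate(zip(arr, arr[1:])) with a parity-selected comparison.
import Mathlib
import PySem

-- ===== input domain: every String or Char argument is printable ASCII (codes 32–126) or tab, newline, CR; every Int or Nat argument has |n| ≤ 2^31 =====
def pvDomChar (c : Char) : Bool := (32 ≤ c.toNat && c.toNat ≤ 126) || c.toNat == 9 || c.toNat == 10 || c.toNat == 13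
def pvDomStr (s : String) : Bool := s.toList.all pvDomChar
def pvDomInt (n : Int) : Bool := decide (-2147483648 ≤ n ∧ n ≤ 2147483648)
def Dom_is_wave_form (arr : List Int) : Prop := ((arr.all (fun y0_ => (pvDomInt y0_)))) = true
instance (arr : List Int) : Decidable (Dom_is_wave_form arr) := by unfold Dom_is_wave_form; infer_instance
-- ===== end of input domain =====

-- B replaces A's vertex-centric step-2 loop over odd indices (two incident edges with
-- boundary guards) by a single unit-step pass over adjacent pairs with a parity-selected
-- comparison; objective: simpler/idiomatic, same O(n) cost.

-- ===== PORT A =====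
def is_wave_form (arr : List Int) : Bool :=
  let n : Int := arr.length
  (PySem.List.pyRange 1 n 2).foldl
    (fun st i =>
      if st then
        if decide (i > 0) && decide (PySem.List.pyGetD arr i 0 > PySem.List.pyGetD arr (i - 1) 0) then
          false
        else if decide (i < n - 1) && decide (PySem.List.pyGetD arr i 0 > PySem.List.pyGetD arr (i + 1) 0) then
          false
        else true
      else false)
    true

-- ===== PORT B =====
def is_wave_form_alt (arr : List Int) : Bool :=
  (PySem.List.enumerate (arr.zip (arr.drop 1)) 0).all
    (fun p => if PySem.Int.mod p.1 2 == 0 then decide (p.2.1 ≥ p.2.2) else decide (p.2.1 ≤ p.2.2))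

-- ===== PRECONDITION & SPEC =====
def Spec_is_wave_form (arr : List Int) (out : Bool) : Prop := out = is_wave_form_alt arr
instance (arr : List Int) (out : Bool) : Decidable (Spec_is_wave_form arr out) := by unfold Spec_is_wave_form; infer_instance

-- ===== CLAIM (what is proved, stated in full; the proofs are below) =====
def Claim_equal_is_wave_form : Prop := ∀ (arr : List Int), Dom_is_wave_form arr → Spec_is_wave_form arr (is_wave_form arr)

-- ===== LEMMAS AND PROOFS =====

-- the common characterisation: on every adjacent edge (k, k+1), even edges fall, odd edges rise
def pvWave (arr : List Int) : Prop :=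
  ∀ k : Nat, k + 1 < arr.length →
    (if k % 2 = 0 then arr.getD (k + 1) 0 ≤ arr.getD k 0 else arr.getD k 0 ≤ arr.getD (k + 1) 0)

theorem pv_foldl_shortcircuit (p : Int → Bool) :
    ∀ (l : List Int) (b : Bool),
      l.foldl (fun st i => if st then p i else false) b = (b && l.all p) := by
  intro l
  induction l with
  | nil => intro b; simp
  | cons x xs ih =>
    intro b
    simp only [List.foldl_cons, List.all_cons, ih]
    cases b <;> simp

theorem pv_getD_cast (arr : List Int) (i : Int) (m : Nat) (h : i = (m : Int)) :
    PySem.List.pyGetD arr i 0 = arr.getD m 0 := by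
  subst h; simp

theorem pv_A_iff (arr : List Int) : is_wave_form arr = true ↔ pvWave arr := by
  unfold is_wave_form pvWave
  rw [pv_foldl_shortcircuit]
  simp only [Bool.true_and, List.all_eq_true]
  constructor
  · intro h k hk
    by_cases hpar : k % 2 = 0
    · rw [if_pos hpar]
      have hmem : ((k : Int) + 1) ∈ PySem.List.pyRange 1 (arr.length : Int) 2 := by
        rw [PySem.List.mem_pyRange_iff_of_pos (by norm_num)]
        exact ⟨by omega, by omega, by omega⟩
      have hg := h _ hmem
      rw [pv_getD_cast arr ((k : Int) + 1) (k + 1) (by push_cast; ring),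
          pv_getD_cast arr ((k : Int) + 1 - 1) k (by ring)] at hg
      by_contra hlt
      rw [if_pos (by simp only [Bool.and_eq_true, decide_eq_true_eq]; exact ⟨by omega, by omega⟩)] at hg
      exact Bool.false_ne_true hg
    · rw [if_neg hpar]
      have hmem : ((k : Int)) ∈ PySem.List.pyRange 1 (arr.length : Int) 2 := by
        rw [PySem.List.mem_pyRange_iff_of_pos (by norm_num)]
        exact ⟨by omega, by omega, by omega⟩
      have hg := h _ hmem
      rw [pv_getD_cast arr ((k : Int)) k rfl,
          pv_getD_cast arr ((k : Int) - 1) (k - 1) (by omega),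
          pv_getD_cast arr ((k : Int) + 1) (k + 1) (by push_cast; ring)] at hg
      by_contra hlt
      by_cases hc1 : (decide ((k : Int) > 0) && decide (arr.getD k 0 > arr.getD (k - 1) 0)) = true
      · rw [if_pos hc1] at hg
        exact Bool.false_ne_true hg
      · rw [if_neg hc1,
            if_pos (by simp only [Bool.and_eq_true, decide_eq_true_eq]
                       exact ⟨by omega, by omega⟩)] at hg
        exact Bool.false_ne_true hg
  · intro h i hi
    rw [PySem.List.mem_pyRange_iff_of_pos (by norm_num)] at hi
    obtain ⟨h1i, h2i, h3i⟩ := hi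
    have h1le : 1 ≤ i.toNat := by omega
    have hiN : i.toNat < arr.length := by omega
    rw [pv_getD_cast arr i i.toNat (by omega),
        pv_getD_cast arr (i - 1) (i.toNat - 1) (by omega),
        pv_getD_cast arr (i + 1) (i.toNat + 1) (by omega)]
    have hA : arr.getD i.toNat 0 ≤ arr.getD (i.toNat - 1) 0 := by
      have hw := h (i.toNat - 1) (by omega)
      rw [if_pos (by omega)] at hw
      have e : i.toNat - 1 + 1 = i.toNat := by omega
      rw [e] at hw
      exact hw
    rw [if_neg (by simp only [Bool.and_eq_true, decide_eq_true_eq, not_and]; intro _; omega)]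
    by_cases hlt : i < (arr.length : Int) - 1
    · have hw := h i.toNat (by omega)
      rw [if_neg (by omega)] at hw
      rw [if_neg (by simp only [Bool.and_eq_true, decide_eq_true_eq, not_and]; intro _; omega)]
    · rw [if_neg (by simp only [Bool.and_eq_true, decide_eq_true_eq, not_and]; intro h'; omega)]

theorem pv_B_iff (arr : List Int) : is_wave_form_alt arr = true ↔ pvWave arr := by
  unfold is_wave_form_alt pvWave
  simp only [List.all_eq_true]
  constructor
  · intro h k hk
    have hkz : k < (arr.zip (arr.drop 1)).length := by
      simp [List.length_zip]; omega
    have hmem : ((0 : Int) + k, (arr.zip (arr.drop 1))[k]) ∈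
        PySem.List.enumerate (arr.zip (arr.drop 1)) 0 := by
      rw [PySem.List.mem_enumerate_iff]
      exact ⟨k, hkz, rfl⟩
    have := h _ hmem
    have hz : (arr.zip (arr.drop 1))[k] = (arr[k]'(by omega), arr[k+1]'(by omega)) := by
      simp [List.getElem_zip]
    rw [hz] at this
    have hm : PySem.Int.mod ((0 : Int) + k) 2 = (k : Int) % 2 := by
      rw [PySem.Int.mod_eq_emod_of_pos (by norm_num)]; ring_nf
    rw [List.getD_eq_getElem arr 0 hk, List.getD_eq_getElem arr 0 (by omega)]
    by_cases hpar : k % 2 = 0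
    · rw [if_pos hpar]
      rw [hm] at this
      have : (if ((k : Int) % 2 == 0) = true then decide (arr[k]'(by omega) ≥ arr[k+1]'(by omega))
          else decide (arr[k]'(by omega) ≤ arr[k+1]'(by omega))) = true := this
      rw [if_pos (by simp; omega)] at this
      simpa using this
    · rw [if_neg hpar]
      rw [hm] at this
      have : (if ((k : Int) % 2 == 0) = true then decide (arr[k]'(by omega) ≥ arr[k+1]'(by omega))
          else decide (arr[k]'(by omega) ≤ arr[k+1]'(by omega))) = true := this
      rw [if_neg (by simp; omega)] at this
      simpa using this
  · intro h p hp
    rw [PySem.List.mem_enumerate_iff] at hp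
    obtain ⟨k, hkz, rfl⟩ := hp
    have hk1 : k + 1 < arr.length := by
      simp [List.length_zip] at hkz; omega
    have hz : (arr.zip (arr.drop 1))[k] = (arr[k]'(by omega), arr[k+1]'(by omega)) := by
      simp [List.getElem_zip]
    have hm : PySem.Int.mod ((0 : Int) + k) 2 = (k : Int) % 2 := by
      rw [PySem.Int.mod_eq_emod_of_pos (by norm_num)]; ring_nf
    have hw := h k hk1
    rw [List.getD_eq_getElem arr 0 hk1, List.getD_eq_getElem arr 0 (by omega)] at hw
    simp only [hz, hm]
    by_cases hpar : k % 2 = 0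
    · rw [if_pos hpar] at hw
      rw [if_pos (by simp; omega)]
      simpa using hw
    · rw [if_neg hpar] at hw
      rw [if_neg (by simp; omega)]
      simpa using hw

-- ===== VERDICT (by name: the statement is the Claim_ definition above) =====
theorem is_wave_form_spec : Claim_equal_is_wave_form := by
  intro arr _
  unfold Spec_is_wave_form
  rw [Bool.eq_iff_iff]
  exact (pv_A_iff arr).trans (pv_B_iff arr).symm
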